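-- pv_equiv track=rewrite | github.com/denisnovik/Calculator | Exam/Calculator.py | log_mask
-- ===== SOURCE A (Python) =====
-- def encode(encode):
--
--     """
--     A function that processes the received string for duplicate characters and combines them into one.
--     Args:
--         encode: Data type: string. Variable holding the raw string
--
--     Returns: Data type: string. The function returns a new variable with the symbols replaced
--     """
--
--     stroka = ''
--     for i in range(len(encode) - 1):
--         if encode[i] == encode[i + 1]:
--             pass
--         else:
--             stroka += encode[i]
--         if i == (len(encode) - 2):
--             stroka += encode[i + 1]
--     return stroka
--
-- def log_mask(value, i, number):
--
--     """
--     The function finds the first occurrence of the value "log2" and replaces "log2(...)" with "ж".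
--     After the character "ж" is replaced by the number obtained from the log_value() function.
--     Args:
--         value: Data type: string. Variable containing the string entered by the user
--         i: Data type: integer. Variable containing the index of the first occurrence of "log2" in the string entered by the user
--         number: Data type: string. Variable containing a string with the computed exponent value
--
--     Returns: Data type: string. The function returns a string in which the "log2(...)" value has been replaced by "number"
--     """
--
--     spisok = list(value)
--     while str(spisok[i]) != ")":
--         spisok[i] = "ж"
--         i = i + 1
--     spisok[i] = "ж"
--     value = ''.join(spisok)
--     value = encode(value)
--     value = value.replace("ж", number, 1)
--     return value
-- ===== SOURCE B (Python) =====
-- def log_mask(value, i, number):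
--     # scan for the first ')' at or after i (read-only; IndexError if absent, like the original)
--     j = i
--     while value[j] != ')':
--         j += 1
--     # one mask char is enough: any run of duplicates collapses to one below
--     s = value[:i] + 'ж' + value[j + 1:]
--     out = []
--     for c in s:
--         if not out or out[-1] != c:
--             out.append(c)
--     return ''.join(out).replace('ж', number, 1)
-- ===== Notes on version B (the rewrite author's own statement) =====
-- stated objective: simpler
-- what changed: B masks with a single slice-built string instead of mutating a char list in a while loop, collapses duplicate runs with one last-char accumulator pass instead of encode's index/i+1 loop with a special-cased final character, and keeps .replace('zh', number, 1). Pre_ keeps the natural domain (0 <= i and a ')' at or after i): negative i, where A's result comes from Python's negative-index wraparound, is excluded, as are inputs with no ')' at or after i, on which A raises IndexError.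
-- intended difference: On single-character inputs (Pre_ then forces value=')' and i=0) with number nonempty, A returns '' because encode drops the only character of a length-1 string, while B returns number, the intended substitution. — e.g. on log_mask(")", 0, "5"): A returns "", B returns "5"
-- outside the precondition, e.g. on log_mask('a)', -2, '5'): A returns '5', B returns '5a)'
import Mathlib
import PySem

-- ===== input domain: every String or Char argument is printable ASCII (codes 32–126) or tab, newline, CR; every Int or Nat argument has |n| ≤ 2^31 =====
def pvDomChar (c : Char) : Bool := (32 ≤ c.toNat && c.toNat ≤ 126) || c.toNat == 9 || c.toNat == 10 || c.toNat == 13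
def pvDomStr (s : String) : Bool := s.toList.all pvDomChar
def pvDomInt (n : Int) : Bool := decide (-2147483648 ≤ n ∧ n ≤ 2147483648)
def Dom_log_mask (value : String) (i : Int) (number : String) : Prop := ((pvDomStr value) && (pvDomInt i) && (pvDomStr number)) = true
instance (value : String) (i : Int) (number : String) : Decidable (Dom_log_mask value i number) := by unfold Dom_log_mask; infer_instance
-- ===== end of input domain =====

-- B builds the masked string with slices around the first ')' and collapses duplicate runs in one
-- accumulator pass, instead of A's destructive char-list while loop plus index-pair encode; return values only.

-- value.replace("ж", number, 1): first occurrence of the single character 'ж' (final step shared by both Pythons)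
def replaceFirstZh (cs : List Char) (number : List Char) : List Char :=
  match cs with
  | [] => []
  | c :: t => if c = 'ж' then number ++ t else c :: replaceFirstZh t number

-- ===== PORT A =====
-- while str(spisok[i]) != ")": spisok[i] = "ж"; i = i + 1   (fuel n+1 covers every input Pre_ admits)
def maskLoopA (fuel : Nat) (spisok : List Char) (i : Int) : List Char × Int :=
  match fuel with
  | 0 => (spisok, i)
  | Nat.succ f =>
    match PySem.List.pyGet? spisok i with
    | none => (spisok, i)
    | some c =>
      if c = ')' then (spisok, i)
      else maskLoopA f (PySem.List.pySetD spisok i 'ж') (i + 1)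

-- helper encode(encode): the range(len-1) loop with the i == len-2 special case
def encodeA (s : List Char) : List Char :=
  (PySem.List.pyRange 0 ((s.length : Int) - 1) 1).foldl (fun stroka i =>
    let stroka := if PySem.List.pyGetD s i ' ' = PySem.List.pyGetD s (i + 1) ' ' then stroka
                  else stroka ++ [PySem.List.pyGetD s i ' ']
    if i = (s.length : Int) - 2 then stroka ++ [PySem.List.pyGetD s (i + 1) ' '] else stroka) []

def log_mask (value : String) (i : Int) (number : String) : String :=
  let spisok := value.toList
  let r := maskLoopA (spisok.length + 1) spisok i
  let spisok := PySem.List.pySetD r.1 r.2 'ж'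
  String.ofList (replaceFirstZh (encodeA spisok) number.toList)

-- ===== PORT B =====
-- j = i; while value[j] != ')': j += 1   (read-only scan; fuel n+1 covers every input Pre_ admits)
def findLoopB (fuel : Nat) (cs : List Char) (j : Int) : Int :=
  match fuel with
  | 0 => j
  | Nat.succ f =>
    match PySem.List.pyGet? cs j with
    | none => j
    | some c => if c = ')' then j else findLoopB f cs (j + 1)

-- for c in s: if not out or out[-1] != c: out.append(c)
def collapseB (s : List Char) : List Char :=
  s.foldl (fun out c =>
    match out.getLast? with
    | none => out ++ [c]
    | some l => if l ≠ c then out ++ [c] else out) []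

def log_mask_alt (value : String) (i : Int) (number : String) : String :=
  let cs := value.toList
  let j := findLoopB (cs.length + 1) cs i
  let s := PySem.List.slice cs none (some i) ++ ['ж'] ++ PySem.List.slice cs (some (j + 1)) none
  String.ofList (replaceFirstZh (collapseB s) number.toList)

-- ===== PRECONDITION & SPEC =====
-- Pre_ keeps the natural domain (i a real index with a ')' at or after it): with no such ')' A raises
-- IndexError, and negative i, where A's value comes from Python's negative-index wraparound, is excluded.
def Pre_log_mask (value : String) (i : Int) (number : String) : Prop :=
  0 ≤ i ∧ ')' ∈ value.toList.drop i.toNat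
instance (value : String) (i : Int) (number : String) : Decidable (Pre_log_mask value i number) := by
  unfold Pre_log_mask; infer_instance
def pvWitness_log_mask : String × Int × String := ("1+log2(8)", 2, "3")

-- On single-character inputs (Pre_ then forces value = ")" and i = 0) with number nonempty, A returns ""
-- because encode drops the only character of a length-1 string, while B returns number, the intended substitution.
def D_log_mask (value : String) (i : Int) (number : String) : Prop :=
  value.toList.length = 1 ∧ number ≠ ""
instance (value : String) (i : Int) (number : String) : Decidable (D_log_mask value i number) := by
  unfold D_log_mask; infer_instance

def Spec_log_mask (value : String) (i : Int) (number : String) (out : String) : Prop :=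
  ¬ D_log_mask value i number → out = log_mask_alt value i number
instance (value : String) (i : Int) (number : String) (out : String) : Decidable (Spec_log_mask value i number out) := by
  unfold Spec_log_mask; infer_instance

def pvDiffWitness_log_mask : String × Int × String := (")", 0, "5")
def pvDiffWitnessOut_log_mask : String × String := ("", "5")

-- ===== CLAIM (what is proved, stated in full; the proofs are below) =====
def Claim_unchanged_log_mask : Prop := ∀ (value : String) (i : Int) (number : String), Dom_log_mask value i number → Pre_log_mask value i number → Spec_log_mask value i number (log_mask value i number)
def Claim_changed_log_mask : Prop := Dom_log_mask (pvDiffWitness_log_mask.1) (pvDiffWitness_log_mask.2.1) (pvDiffWitness_log_mask.2.2) ∧ Pre_log_mask (pvDiffWitness_log_mask.1) (pvDiffWitness_log_mask.2.1) (pvDiffWitness_log_mask.2.2) ∧ D_log_mask (pvDiffWitness_log_mask.1) (pvDiffWitness_log_mask.2.1) (pvDiffWitness_log_mask.2.2) ∧ log_mask (pvDiffWitness_log_mask.1) (pvDiffWitness_log_mask.2.1) (pvDiffWitness_log_mask.2.2) = pvDiffWitnessOut_log_mask.1 ∧ log_mask_alt (pvDiffWitness_log_mask.1) (pvDiffWitness_log_mask.2.1)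 (pvDiffWitness_log_mask.2.2) = pvDiffWitnessOut_log_mask.2 ∧ pvDiffWitnessOut_log_mask.1 ≠ pvDiffWitnessOut_log_mask.2
def Claim_exact_log_mask : Prop := ∀ (value : String) (i : Int) (number : String), Dom_log_mask value i number → Pre_log_mask value i number → D_log_mask value i number → log_mask value i number ≠ log_mask_alt value i number

-- ===== LEMMAS AND PROOFS =====

-- keep-first-of-each-run, the common normal form of encodeA and collapseB
def ded : List Char → List Char
  | [] => []
  | [c] => [c]
  | a :: b :: t => if a = b then ded (b :: t) else a :: ded (b :: t)

lemma collapseB_go (s : List Char) : ∀ (out : List Char) (c : Char),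
    s.foldl (fun out c =>
      match out.getLast? with
      | none => out ++ [c]
      | some l => if l ≠ c then out ++ [c] else out) (out ++ [c]) = out ++ ded (c :: s) := by
  induction s with
  | nil => intro out c; simp [ded]
  | cons d t ih =>
    intro out c
    by_cases hdc : c = d
    · subst hdc
      simp only [List.foldl_cons, List.getLast?_concat, ne_eq, not_true_eq_false,
        reduceIte, ded]
      simpa [ded] using ih out c
    · have : ded (c :: d :: t) = c :: ded (d :: t) := by simp [ded, hdc]
      rw [this]
      simp only [List.foldl_cons, List.getLast?_concat]
      rw [if_pos (by exact hdc)]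
      have := ih (out ++ [c]) d
      simpa using this

lemma collapseB_eq_ded (s : List Char) : collapseB s = ded s := by
  cases s with
  | nil => rfl
  | cons c t => simpa [collapseB] using collapseB_go t [] c

lemma ded_cons_cons (x : Char) (l1 l2 : List Char) (h1 : l1 ≠ []) (h2 : l2 ≠ [])
    (hh : l1.head? = l2.head?) (hd : ded l1 = ded l2) : ded (x :: l1) = ded (x :: l2) := by
  obtain ⟨a, t1, rfl⟩ := List.exists_cons_of_ne_nil h1
  obtain ⟨b, t2, rfl⟩ := List.exists_cons_of_ne_nil h2
  simp only [List.head?_cons, Option.some_inj] at hh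
  subst hh
  by_cases hxa : x = a
  · simp [ded, hxa, hd]
  · simp [ded, hxa, hd]

lemma ded_middle_dup (p : List Char) (q : List Char) (c : Char) :
    ded (p ++ c :: c :: q) = ded (p ++ c :: q) := by
  induction p with
  | nil => simp [ded]
  | cons x p ih =>
    cases p with
    | nil => exact ded_cons_cons x _ _ (by simp) (by simp) (by simp) (by simpa using ih)
    | cons y p' => exact ded_cons_cons x _ _ (by simp) (by simp) (by simp) (by simpa using ih)

lemma ded_replicate (r : Nat) (p q : List Char) (c : Char) :
    ded (p ++ List.replicate (r + 1) c ++ q) = ded (p ++ [c] ++ q) := by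
  induction r with
  | zero => rfl
  | succ r ih =>
    have : p ++ List.replicate (r + 2) c ++ q = p ++ c :: c :: (List.replicate r c ++ q) := by
      simp [List.replicate_succ]
    rw [this, ded_middle_dup p (List.replicate r c ++ q) c]
    simpa [List.replicate_succ] using ih

def gN (s : List Char) (k : Nat) : List Char :=
  (if s.getD k ' ' = s.getD (k + 1) ' ' then [] else [s.getD k ' ']) ++
  (if k = s.length - 2 then [s.getD (k + 1) ' '] else [])

lemma encodeA_flat (s : List Char) (h2 : 2 ≤ s.length) :
    encodeA s = (List.range (s.length - 1)).flatMap (gN s) := by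
  unfold encodeA
  rw [show ((PySem.List.pyRange 0 ((s.length : Int) - 1) 1).foldl (fun stroka i =>
    let stroka := if PySem.List.pyGetD s i ' ' = PySem.List.pyGetD s (i + 1) ' ' then stroka
                  else stroka ++ [PySem.List.pyGetD s i ' ']
    if i = (s.length : Int) - 2 then stroka ++ [PySem.List.pyGetD s (i + 1) ' '] else stroka) [])
    = ((PySem.List.pyRange 0 ((s.length : Int) - 1) 1).foldl (fun acc i => acc ++
        ((if PySem.List.pyGetD s i ' ' = PySem.List.pyGetD s (i + 1) ' ' then [] else [PySem.List.pyGetD s i ' ']) ++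
         (if i = (s.length : Int) - 2 then [PySem.List.pyGetD s (i + 1) ' '] else []))) [])
    from List.foldl_ext _ _ _ (fun a i _ => by
      simp only []
      split_ifs <;> simp)]
  rw [PySem.List.foldl_append_eq_flatMap]
  rw [PySem.List.pyRange_one]
  rw [List.flatMap_map]
  have hlen : ((s.length : Int) - 1 - 0).toNat = s.length - 1 := by omega
  rw [hlen]
  apply List.flatMap_congr
  intro k hk
  simp only [List.mem_range] at hk
  unfold gN
  have e1 : PySem.List.pyGetD s ((0 : Int) + k) ' ' = s.getD k ' ' := by
    simpa using PySem.List.pyGetD_natCast s k ' '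
  have e2 : PySem.List.pyGetD s ((0 : Int) + k + 1) ' ' = s.getD (k + 1) ' ' := by
    have : ((0 : Int) + k + 1) = ((k + 1 : Nat) : Int) := by push_cast; ring
    rw [this]; simpa using PySem.List.pyGetD_natCast s (k + 1) ' '
  have e3 : ((0 : Int) + k = (s.length : Int) - 2) ↔ (k = s.length - 2) := by omega
  rw [e1, e2]
  by_cases hc : k = s.length - 2 <;> simp [hc] <;> simp [hc] at e3 ⊢ <;> tauto

lemma gN_shift (a : Char) (s : List Char) (h : 2 ≤ s.length) (k : Nat) :
    gN (a :: s) (k + 1) = gN s k := by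
  unfold gN
  have h3 : 0 < s.length := by omega
  have hiff : (k + 1 = s.length - 1) ↔ (k = s.length - 2) := by omega
  simp [hiff]

lemma flat_gN_eq_ded : ∀ s : List Char, 2 ≤ s.length →
    (List.range (s.length - 1)).flatMap (gN s) = ded s := by
  intro s
  induction s with
  | nil => intro h; simp at h
  | cons a s ih =>
    intro _
    cases s with
    | nil => simp at *
    | cons b t =>
      cases t with
      | nil => by_cases hab : a = b <;> simp [gN, ded, hab, List.range_succ]
      | cons c u =>
        have hlen2 : 2 ≤ (b :: c :: u).length := by simp
        have : (a :: b :: c :: u).length - 1 = ((b :: c :: u).length - 1) + 1 := by simp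
        rw [this, List.range_succ_eq_map, List.flatMap_cons, List.flatMap_map]
        have : ((List.range ((b :: c :: u).length - 1)).flatMap fun k => gN (a :: b :: c :: u) (Nat.succ k))
            = (List.range ((b :: c :: u).length - 1)).flatMap (gN (b :: c :: u)) := by
          apply List.flatMap_congr
          intro k _
          exact gN_shift a (b :: c :: u) hlen2 k
        rw [this, ih hlen2]
        have h0 : gN (a :: b :: c :: u) 0 = if a = b then [] else [a] := by
          have hne : ¬ ((0 : Nat) = (a :: b :: c :: u).length - 2) := by simp
          by_cases hab : a = b <;> simp [gN, hab]
        rw [h0]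
        by_cases hab : a = b <;> simp [ded, hab]

lemma encodeA_eq_ded (s : List Char) (h : 2 ≤ s.length) : encodeA s = ded s := by
  rw [encodeA_flat s h, flat_gN_eq_ded s h]

lemma findLoopB_eq : ∀ (fuel : Nat) (cs : List Char) (a k : Nat),
    a ≤ k → k < cs.length → cs[k]? = some ')' →
    (∀ m, a ≤ m → m < k → cs[m]? ≠ some ')') →
    k + 1 - a ≤ fuel →
    findLoopB fuel cs (a : Int) = (k : Int) := by
  intro fuel
  induction fuel with
  | zero => intro cs a k hak hk hck hmin hfuel; omega
  | succ f ih =>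
    intro cs a k hak hk hck hmin hfuel
    have hga : PySem.List.pyGet? cs (a : Int) = cs[a]? := by
      simp [pysem]
    have ha : a < cs.length := by omega
    obtain ⟨c, hc⟩ : ∃ c, cs[a]? = some c := ⟨cs[a], by simp [ha]⟩
    rw [findLoopB, hga, hc]
    simp only []
    by_cases hak' : a = k
    · subst hak'
      rw [hck] at hc
      rw [if_pos (Option.some_inj.mp hc).symm]
    · have halt : a < k := by omega
      have hcne : c ≠ ')' := by
        intro h; exact hmin a le_rfl halt (by rw [hc, h])
      rw [if_neg hcne]
      have : ((a : Int) + 1) = ((a + 1 : Nat) : Int) := by push_cast; ring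
      rw [this]
      exact ih cs (a + 1) k (by omega) hk hck (fun m h1 h2 => hmin m (by omega) h2) (by omega)

lemma maskLoopA_eq : ∀ (fuel : Nat) (cs : List Char) (a k : Nat),
    a ≤ k → k < cs.length → cs[k]? = some ')' →
    (∀ m, a ≤ m → m < k → cs[m]? ≠ some ')') →
    k + 1 - a ≤ fuel →
    maskLoopA fuel cs (a : Int) =
      (cs.take a ++ List.replicate (k - a) 'ж' ++ cs.drop k, (k : Int)) := by
  intro fuel
  induction fuel with
  | zero => intro cs a k hak hk hck hmin hfuel; omega
  | succ f ih =>
    intro cs a k hak hk hck hmin hfuel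
    have ha : a < cs.length := by omega
    have hga : PySem.List.pyGet? cs (a : Int) = cs[a]? := by simp [pysem]
    obtain ⟨c, hc⟩ : ∃ c, cs[a]? = some c := ⟨cs[a], by simp [ha]⟩
    rw [maskLoopA, hga, hc]
    simp only []
    by_cases hak' : a = k
    · subst hak'
      rw [hck] at hc
      rw [if_pos (Option.some_inj.mp hc).symm]
      simp
    · have halt : a < k := by omega
      have hcne : c ≠ ')' := by
        intro h; exact hmin a le_rfl halt (by rw [hc, h])
      rw [if_neg hcne]
      have hset : PySem.List.pySetD cs (a : Int) 'ж' = cs.set a 'ж' := by simp [pysem]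
      have hcast : ((a : Int) + 1) = ((a + 1 : Nat) : Int) := by push_cast; ring
      rw [hset, hcast]
      rw [ih (cs.set a 'ж') (a + 1) k (by omega) (by simpa using hk)
        (by rw [List.getElem?_set_ne (by omega)]; exact hck)
        (fun m h1 h2 => by rw [List.getElem?_set_ne (by omega)]; exact hmin m (by omega) h2)
        (by omega)]
      simp only [Prod.mk.injEq]
      refine ⟨?_, trivial⟩
      rw [List.set_eq_take_cons_drop 'ж' ha]
      rw [List.take_append, List.drop_append]
      have hta : (cs.take a).length = a := by simp; omega
      rw [hta]
      have h1 : ('ж' :: cs.drop (a + 1)).take (a + 1 - a) = ['ж'] := by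
        simp [show a + 1 - a = 1 by omega]
      have h2 : (cs.take a).take (a + 1) = cs.take a := by
        rw [List.take_take]; congr 1; omega
      have h3 : (cs.take a).drop k = [] := by
        apply List.drop_eq_nil_of_le; omega
      have h4 : ('ж' :: cs.drop (a + 1)).drop (k - a) = cs.drop k := by
        have : k - a = (k - a - 1) + 1 := by omega
        rw [this]
        simp [List.drop_drop]
        congr 1; omega
      rw [h1, h2, h3, h4]
      have h5 : List.replicate (k - a) 'ж' = 'ж' :: List.replicate (k - (a + 1)) 'ж' := by
        rw [show k - a = (k - (a + 1)) + 1 by omega, List.replicate_succ]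
      rw [h5]
      simp

theorem main (value : String) (i : Int) (number : String)
    (hpre : 0 ≤ i ∧ ')' ∈ value.toList.drop i.toNat)
    (hnd : ¬ (value.toList.length = 1 ∧ number ≠ "")) :
    log_mask value i number = log_mask_alt value i number := by
  obtain ⟨hi, hmem⟩ := hpre
  set cs := value.toList with hcs
  set a := i.toNat with ha
  have hia : i = (a : Int) := (Int.toNat_of_nonneg hi).symm
  set k := a + (cs.drop a).findIdx (fun c => c = ')') with hkdef
  have hfi : (cs.drop a).findIdx (fun c => c = ')') < (cs.drop a).length :=
    List.findIdx_lt_length_of_exists ⟨')', hmem, by simp⟩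
  have hdlen : (cs.drop a).length = cs.length - a := by simp
  have hk : k < cs.length := by omega
  have han : a < cs.length := by omega
  have hak : a ≤ k := by omega
  have hck : cs[k]? = some ')' := by
    have h1 := List.findIdx_getElem (p := fun c => c = ')') (xs := cs.drop a) (w := hfi)
    have h2 : (cs.drop a)[(cs.drop a).findIdx (fun c => c = ')')]? = some ')' := by
      rw [List.getElem?_eq_getElem hfi]
      simpa using h1
    rw [List.getElem?_drop] at h2
    exact h2
  have hmin : ∀ m, a ≤ m → m < k → cs[m]? ≠ some ')' := by
    intro m h1 h2 hbad
    have hml : m - a < (cs.drop a).length := by omega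
    have := List.not_of_lt_findIdx (p := fun c => c = ')') (xs := cs.drop a)
      (i := m - a) (by omega)
    have hq : (cs.drop a)[m - a]? = some ')' := by
      rw [List.getElem?_drop, show a + (m - a) = m by omega]; exact hbad
    rw [List.getElem?_eq_getElem hml] at hq
    have hc' : (cs.drop a)[m - a] = ')' := Option.some_inj.mp hq
    simp at this
    rw [List.getElem_drop] at hc'
    exact this hc'
  have hmask := maskLoopA_eq (cs.length + 1) cs a k hak hk hck hmin (by omega)
  have hfind := findLoopB_eq (cs.length + 1) cs a k hak hk hck hmin (by omega)
  have hsliceL : PySem.List.slice cs none (some ((a : Nat) : Int)) = cs.take a :=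
    PySem.List.slice_to_natCast cs a
  have hsliceR : PySem.List.slice cs (some ((k : Int) + 1)) none = cs.drop (k + 1) := by
    rw [show ((k : Int) + 1) = ((k + 1 : Nat) : Int) by push_cast; ring]
    exact PySem.List.slice_from_natCast cs (k + 1)
  have hsetM : (cs.take a ++ List.replicate (k - a) 'ж' ++ cs.drop k).set k 'ж'
      = cs.take a ++ List.replicate (k - a + 1) 'ж' ++ cs.drop (k + 1) := by
    have hP : (cs.take a ++ List.replicate (k - a) 'ж').length = k := by simp; omega
    rw [List.drop_eq_getElem_cons hk, List.set_append]
    rw [if_neg (by rw [hP]; omega)]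
    rw [hP, Nat.sub_self, List.set_cons_zero]
    rw [List.replicate_succ' (n := k - a)]
    simp [List.append_assoc]
  by_cases hn1 : cs.length = 1
  · -- single-character value: Pre_ forces cs = [')'] and i = 0; outside D_ number = ""
    have hnum : number = "" := by
      by_contra hne
      exact hnd ⟨hn1, hne⟩
    have ha0 : a = 0 := by omega
    have hk0 : k = 0 := by omega
    obtain ⟨c, hc⟩ := List.length_eq_one_iff.mp hn1
    have hcp : c = ')' := by
      rw [hc, hk0] at hck
      simpa using hck
    subst hcp
    have hv : value.toList = [')'] := hcs ▸ hc
    have hi0 : i = 0 := by rw [hia, ha0]; rfl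
    subst hi0 hnum
    unfold log_mask log_mask_alt
    rw [hv]
    rfl
  · -- generic case: both sides collapse to ded of the same string
    have hn2 : 2 ≤ cs.length := by omega
    unfold log_mask log_mask_alt
    simp only []
    rw [← hcs, hia, hmask, hfind]
    simp only []
    rw [PySem.List.pySetD_natCast, hsetM, hsliceL, hsliceR]
    rw [encodeA_eq_ded _ (by simp; omega)]
    rw [collapseB_eq_ded, ded_replicate (k - a) (cs.take a) (cs.drop (k + 1)) 'ж']

theorem tight (value : String) (i : Int) (number : String)
    (hpre : 0 ≤ i ∧ ')' ∈ value.toList.drop i.toNat)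
    (hd : value.toList.length = 1 ∧ number ≠ "") :
    log_mask value i number ≠ log_mask_alt value i number := by
  obtain ⟨hlen, hnum⟩ := hd
  obtain ⟨hi, hmem⟩ := hpre
  have hdne : value.toList.drop i.toNat ≠ [] := List.ne_nil_of_mem hmem
  have ha0 : i.toNat = 0 := by
    by_contra h
    exact hdne (List.drop_eq_nil_iff.mpr (by omega))
  have hi0 : i = 0 := by omega
  obtain ⟨c, hc⟩ := List.length_eq_one_iff.mp hlen
  have hcp : c = ')' := by
    rw [hc, ha0] at hmem
    simp at hmem
    exact hmem.symm
  subst hcp hi0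
  have hA : log_mask value 0 number = "" := by
    unfold log_mask
    rw [hc]
    rfl
  have hB : log_mask_alt value 0 number = String.ofList (number.toList ++ []) := by
    unfold log_mask_alt
    rw [hc]
    rfl
  intro heq
  rw [hA, hB] at heq
  have h2 := congrArg String.toList heq
  simp at h2
  exact hnum h2

-- ===== VERDICT (by name: the statement is the Claim_ definition above) =====
theorem log_mask_spec : Claim_unchanged_log_mask := by
  intro value i number _ hpre hnd
  exact main value i number hpre hnd

theorem log_mask_changed : Claim_changed_log_mask := by
  unfold Claim_changed_log_mask; decide

theorem log_mask_tight : Claim_exact_log_mask := by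
  intro value i number _ hpre hd
  exact tight value i number hpre hd
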